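-- pv_equiv track=rewrite | github.com/jitaeyun/algorithm | leetcode/Python/ambiguous-coordinates.py | subMake
-- ===== SOURCE A (Python) =====
-- def subMake(s):
--     if len(s) == 1:
--         return [s]
--     elif s[0]==s[-1]=='0':
--         return []
--     elif s[0]=='0':
--         return [s[0:1]+'.'+s[1:]]
--     elif s[-1]=='0':
--         return [s]
--     sol = [s]
--     for i in range(1,len(s)):
--         sol.append(s[:i]+'.'+s[i:])
--     return sol
-- ===== SOURCE B (Python) =====
-- def subMake(s):
--     def valid(intp, frac):
--         ok_int = len(intp) == 1 or not intp.startswith('0')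
--         ok_frac = frac == '' or not frac.endswith('0')
--         return ok_int and ok_frac
--     res = []
--     if valid(s, ''):
--         res.append(s)
--     for i in range(1, len(s)):
--         if valid(s[:i], s[i:]):
--             res.append(s[:i] + '.' + s[i:])
--     return res
-- ===== Notes on version B (the rewrite author's own statement) =====
-- stated objective: simpler
-- what changed: Replaces A's cascade of special-case branches on a leading/trailing zero digit by one uniform pass that enumerates the bare string and every split point and filters each candidate through a single valid(intp, frac) predicate.
-- outside the precondition, e.g. on subMake(''): A raises IndexError, B returns ['']
import Mathlib
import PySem

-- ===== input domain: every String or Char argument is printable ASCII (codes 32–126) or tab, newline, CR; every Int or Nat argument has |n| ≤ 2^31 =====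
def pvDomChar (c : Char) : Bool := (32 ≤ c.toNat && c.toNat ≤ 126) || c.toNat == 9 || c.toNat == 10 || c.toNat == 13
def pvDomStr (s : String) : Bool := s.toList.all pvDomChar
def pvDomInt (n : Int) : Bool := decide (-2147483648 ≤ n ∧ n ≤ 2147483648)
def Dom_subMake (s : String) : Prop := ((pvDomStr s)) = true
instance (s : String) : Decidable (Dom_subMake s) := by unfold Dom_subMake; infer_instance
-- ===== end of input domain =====

-- B replaces A's branch cascade on a leading/trailing zero digit by one enumerate-then-validate pass (objective: simpler decomposition, same cost).

-- ===== PORT A =====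
-- literal transliteration of A on the character list; subMake wraps String ↔ List Char
def subMakeCoreA (cs : List Char) : List (List Char) :=
  if cs.length = 1 then [cs]
  else if PySem.List.pyGet? cs 0 = some '0' ∧ PySem.List.pyGet? cs (-1) = some '0' then []
  else if PySem.List.pyGet? cs 0 = some '0' then
    [PySem.List.slice cs (some 0) (some 1) ++ '.' :: PySem.List.slice cs (some 1) none]
  else if PySem.List.pyGet? cs (-1) = some '0' then [cs]
  else
    (PySem.List.pyRange 1 cs.length 1).foldl
      (fun sol i => sol ++ [PySem.List.slice cs none (some i) ++ '.' :: PySem.List.slice cs (some i) none])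
      [cs]

def subMake (s : String) : List String := (subMakeCoreA s.toList).map String.ofList

-- ===== PORT B =====
-- valid(intp, frac) of Source B
def pvValid (intp frac : List Char) : Bool :=
  (intp.length == 1 || !(PySem.Chars.startswith intp ['0'])) &&
  (frac == [] || !(PySem.Chars.endswith frac ['0']))

def subMakeCoreB (cs : List Char) : List (List Char) :=
  let res := if pvValid cs [] then [cs] else []
  (PySem.List.pyRange 1 cs.length 1).foldl
    (fun res i =>
      if pvValid (PySem.List.slice cs none (some i)) (PySem.List.slice cs (some i) none) then
        res ++ [PySem.List.slice cs none (some i) ++ '.' :: PySem.List.slice cs (some i) none]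
      else res)
    res

def subMake_alt (s : String) : List String := (subMakeCoreB s.toList).map String.ofList

-- ===== PRECONDITION & SPEC =====
-- Pre_ excludes only the empty string, on which Python A raises IndexError (indexing the first character).
def Pre_subMake (s : String) : Prop := s ≠ ""
instance (s : String) : Decidable (Pre_subMake s) := by unfold Pre_subMake; infer_instance
def pvWitness_subMake : String := "230"

def Spec_subMake (s : String) (out : List String) : Prop := out = subMake_alt s
instance (s : String) (out : List String) : Decidable (Spec_subMake s out) := by unfold Spec_subMake; infer_instance

-- ===== CLAIM (what is proved, stated in full; the proofs are below) =====
def Claim_equal_subMake : Prop := ∀ (s : String), Dom_subMake s → Pre_subMake s → Spec_subMake s (subMake s)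

-- ===== LEMMAS AND PROOFS =====

lemma pv_getLast?_drop (xs : List Char) (k : Nat) (h : k < xs.length) :
    (xs.drop k).getLast? = xs.getLast? := by
  induction xs generalizing k with
  | nil => simp
  | cons a t ih =>
    cases k with
    | zero => rfl
    | succ m =>
      simp at h
      rw [List.drop_succ_cons, ih m h]
      cases t with
      | nil => simp at h
      | cons b u => simp

lemma pv_startswith_single (xs : List Char) :
    PySem.Chars.startswith xs ['0'] = true ↔ xs.head? = some '0' := by
  rw [PySem.Chars.startswith_iff]
  constructor
  · rintro ⟨t, rfl⟩; rfl
  · intro h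
    cases xs with
    | nil => simp at h
    | cons a t => simp at h; exact ⟨t, by simp [h]⟩

lemma pv_endswith_single (xs : List Char) :
    PySem.Chars.endswith xs ['0'] = true ↔ xs.getLast? = some '0' := by
  rw [PySem.Chars.endswith_iff]
  constructor
  · rintro ⟨t, rfl⟩; simp
  · intro h; exact ⟨xs.dropLast, List.dropLast_append_getLast? '0' h⟩

lemma pv_head?_take (xs : List Char) (k : Nat) (h : 1 ≤ k) : (xs.take k).head? = xs.head? := by
  cases xs with
  | nil => simp
  | cons a t => cases k with
    | zero => omega
    | succ m => simp

-- validity of the split at k, per case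
lemma pv_valid_false_of_last0 (cs : List Char) (k : Nat) (hk : k < cs.length)
    (hl : cs.getLast? = some '0') : pvValid (cs.take k) (cs.drop k) = false := by
  have hne : cs.drop k ≠ [] := by
    intro h; have := congrArg List.length h; simp at this; omega
  have he : PySem.Chars.endswith (cs.drop k) ['0'] = true := by
    rw [pv_endswith_single, pv_getLast?_drop cs k hk, hl]
  simp [pvValid, he, hne]

lemma pv_valid_false_of_head0 (cs : List Char) (k : Nat) (h2 : 2 ≤ k) (hk : k ≤ cs.length)
    (hh : cs.head? = some '0') : pvValid (cs.take k) (cs.drop k) = false := by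
  have hlen : (cs.take k).length = k := by simp; omega
  have hs : PySem.Chars.startswith (cs.take k) ['0'] = true := by
    rw [pv_startswith_single, pv_head?_take cs k (by omega), hh]
  simp [pvValid, hs, hlen]
  omega

lemma pv_valid_true (cs : List Char) (k : Nat) (h1 : 1 ≤ k) (hk : k < cs.length)
    (hl : cs.getLast? ≠ some '0') (hh : k = 1 ∨ cs.head? ≠ some '0') :
    pvValid (cs.take k) (cs.drop k) = true := by
  have he : PySem.Chars.endswith (cs.drop k) ['0'] = false := by
    cases hE : PySem.Chars.endswith (cs.drop k) ['0']
    · rfl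
    · exact absurd (by rw [← pv_getLast?_drop cs k hk, ← pv_endswith_single]; exact hE) hl
  rcases hh with hcase | hcase
  · subst hcase
    rw [List.drop_one] at he
    simp [pvValid, he]
    exact Or.inl (by omega)
  · have hsw : PySem.Chars.startswith (cs.take k) ['0'] = false := by
      cases hS : PySem.Chars.startswith (cs.take k) ['0']
      · rfl
      · exact absurd (by rw [← pv_head?_take cs k h1, ← pv_startswith_single]; exact hS) hcase
    simp [pvValid, he, hsw]

-- the two fold shapes
lemma pv_fold_false (cs : List Char) (l : List Int) (acc : List (List Char))
    (h : ∀ i ∈ l, pvValid (PySem.List.slice cs none (some i)) (PySem.List.slice cs (some i) none) = false) :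
    l.foldl
      (fun res i =>
        if pvValid (PySem.List.slice cs none (some i)) (PySem.List.slice cs (some i) none) then
          res ++ [PySem.List.slice cs none (some i) ++ '.' :: PySem.List.slice cs (some i) none]
        else res) acc = acc := by
  induction l generalizing acc with
  | nil => rfl
  | cons a t ih =>
    have hfa : pvValid (PySem.List.slice cs none (some a)) (PySem.List.slice cs (some a) none)
        = false := h a (by simp)
    simp only [List.foldl_cons, hfa, Bool.false_eq_true, if_false]
    exact ih acc (fun i hi => h i (by simp [hi]))

lemma pv_fold_true (cs : List Char) (l : List Int) (acc : List (List Char))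
    (h : ∀ i ∈ l, pvValid (PySem.List.slice cs none (some i)) (PySem.List.slice cs (some i) none) = true) :
    l.foldl
      (fun res i =>
        if pvValid (PySem.List.slice cs none (some i)) (PySem.List.slice cs (some i) none) then
          res ++ [PySem.List.slice cs none (some i) ++ '.' :: PySem.List.slice cs (some i) none]
        else res) acc
    = l.foldl
        (fun sol i => sol ++ [PySem.List.slice cs none (some i) ++ '.' :: PySem.List.slice cs (some i) none])
        acc := by
  induction l generalizing acc with
  | nil => rfl
  | cons a t ih =>
    have hfa : pvValid (PySem.List.slice cs none (some a)) (PySem.List.slice cs (some a) none)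
        = true := h a (by simp)
    simp only [List.foldl_cons, hfa, if_true]
    exact ih _ (fun i hi => h i (by simp [hi]))

-- slice at a member of range(1, len) is take/drop at i.toNat
lemma pv_slice_mem (cs : List Char) (i : Int) (h1 : 1 ≤ i) :
    PySem.List.slice cs none (some i) = cs.take i.toNat ∧
    PySem.List.slice cs (some i) none = cs.drop i.toNat :=
  ⟨PySem.List.slice_to cs (by omega), PySem.List.slice_from cs (by omega)⟩

lemma pv_core_eq (cs : List Char) (h : cs ≠ []) : subMakeCoreA cs = subMakeCoreB cs := by
  by_cases h1 : cs.length = 1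
  · obtain ⟨c, rfl⟩ : ∃ c, cs = [c] := by
      cases cs with
      | nil => simp at h1
      | cons a t => cases t with
        | nil => exact ⟨a, rfl⟩
        | cons b u => simp at h1
    simp [subMakeCoreA, subMakeCoreB, pvValid, PySem.List.pyRange_one_eq_nil]
  · -- length ≥ 2
    have hlen2 : 2 ≤ cs.length := by
      cases cs with
      | nil => exact absurd rfl h
      | cons a t => cases t with
        | nil => simp at h1
        | cons b u => simp
    obtain ⟨c, rest, rfl⟩ : ∃ c rest, cs = c :: rest := by
      cases cs with
      | nil => exact absurd rfl h
      | cons a t => exact ⟨a, t, rfl⟩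
    set cs := c :: rest with hcs
    have h0 : PySem.List.pyGet? cs 0 = some c := PySem.List.pyGet?_zero_cons c rest
    have hm1 : PySem.List.pyGet? cs (-1) = cs.getLast? := PySem.List.pyGet?_neg_one cs
    have hswi : PySem.Chars.startswith cs ['0'] = true ↔ c = '0' := by
      rw [pv_startswith_single]; simp [hcs]
    have hinit : (if pvValid cs [] then [cs] else []) = if c = '0' then [] else [cs] := by
      by_cases hc : c = '0'
      · have hsw : PySem.Chars.startswith cs ['0'] = true := hswi.mpr hc
        simp [pvValid, hsw, hc, h1]
      · have hsw : PySem.Chars.startswith cs ['0'] = false := by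
          cases hS : PySem.Chars.startswith cs ['0']
          · rfl
          · exact absurd (hswi.mp hS) hc
        simp [pvValid, hsw, hc]
    by_cases hc0 : c = '0' <;> by_cases hlast : cs.getLast? = some '0'
    · -- both '0' : A = [], B = []
      rw [subMakeCoreA, subMakeCoreB]
      rw [if_neg h1, if_pos (by simp [h0, hm1, hlast, hc0])]
      simp only [hinit, if_pos hc0]
      rw [pv_fold_false]
      intro i hi
      rw [PySem.List.mem_pyRange_one] at hi
      rw [(pv_slice_mem cs i hi.1).1, (pv_slice_mem cs i hi.1).2]
      exact pv_valid_false_of_last0 cs i.toNat (by omega) hlast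
    · -- leading '0', last not '0' : A = ['0.rest'], B same
      rw [subMakeCoreA, subMakeCoreB]
      rw [if_neg h1, if_neg (by rw [h0, hm1]; intro ⟨_, hb⟩; exact hlast hb),
          if_pos (by rw [h0, hc0])]
      simp only [hinit, if_pos hc0]
      rw [PySem.List.pyRange_one_cons (by exact_mod_cast by omega : (1:Int) < cs.length)]
      simp only [List.foldl_cons]
      rw [if_pos (by
        rw [(pv_slice_mem cs 1 le_rfl).1, (pv_slice_mem cs 1 le_rfl).2]
        exact pv_valid_true cs 1 le_rfl (by omega) hlast (Or.inl rfl))]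
      rw [pv_fold_false]
      · rw [PySem.List.slice_zero_start]; simp
      · intro i hi
        rw [PySem.List.mem_pyRange_one] at hi
        rw [(pv_slice_mem cs i (by omega)).1, (pv_slice_mem cs i (by omega)).2]
        exact pv_valid_false_of_head0 cs i.toNat (by omega) (by omega) (by simp [hcs, hc0])
    · -- last '0', leading not '0' : A = [cs], B = [cs]
      rw [subMakeCoreA, subMakeCoreB]
      rw [if_neg h1, if_neg (by rw [h0]; intro ⟨ha, _⟩; exact hc0 (by injection ha)),
          if_neg (by rw [h0]; intro ha; exact hc0 (by injection ha)),
          if_pos (by rw [hm1, hlast])]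
      simp only [hinit, if_neg hc0]
      rw [pv_fold_false]
      intro i hi
      rw [PySem.List.mem_pyRange_one] at hi
      rw [(pv_slice_mem cs i hi.1).1, (pv_slice_mem cs i hi.1).2]
      exact pv_valid_false_of_last0 cs i.toNat (by omega) hlast
    · -- neither : all candidates valid
      rw [subMakeCoreA, subMakeCoreB]
      rw [if_neg h1, if_neg (by rw [h0]; intro ⟨ha, _⟩; exact hc0 (by injection ha)),
          if_neg (by rw [h0]; intro ha; exact hc0 (by injection ha)),
          if_neg (by rw [hm1]; exact hlast)]
      simp only [hinit, if_neg hc0]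
      rw [pv_fold_true]
      intro i hi
      rw [PySem.List.mem_pyRange_one] at hi
      rw [(pv_slice_mem cs i hi.1).1, (pv_slice_mem cs i hi.1).2]
      exact pv_valid_true cs i.toNat (by omega) (by omega) hlast (Or.inr (by simp [hcs, hc0]))

-- ===== VERDICT (by name: the statement is the Claim_ definition above) =====
theorem subMake_spec : Claim_equal_subMake := by
  intro s _ hpre
  have hne : s.toList ≠ [] := fun h => hpre (String.toList_eq_nil_iff.mp h)
  unfold Spec_subMake subMake subMake_alt
  rw [pv_core_eq s.toList hne]
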